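-- pv_equiv track=rewrite | github.com/QuanyuLong/Chinese_word_segmentation | form_gen_trie.py | seg
-- ===== SOURCE A (Python) =====
-- def seg(text):
--     result_list = []
--     t = 0
--     for i in range(len(text)):
--             if text[i] == '\n':
--                 result_list += [text[t:i + 1]]
--                 t = i + 1
--     result_list += [text[t:]]
--     return (result_list)
-- ===== SOURCE B (Python) =====
-- def seg(text):
--     parts = text.split('\n')
--     return [p + '\n' for p in parts[:-1]] + [parts[-1]]
-- ===== Notes on version B (the rewrite author's own statement) =====
-- stated objective: simpler
-- what changed: Replaces A's manual index-tracking scan (tracking the start index t and slicing at each newline) with a single library str.split on the newline character followed by a pass reattaching the newline to every part except the last.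
import Mathlib
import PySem

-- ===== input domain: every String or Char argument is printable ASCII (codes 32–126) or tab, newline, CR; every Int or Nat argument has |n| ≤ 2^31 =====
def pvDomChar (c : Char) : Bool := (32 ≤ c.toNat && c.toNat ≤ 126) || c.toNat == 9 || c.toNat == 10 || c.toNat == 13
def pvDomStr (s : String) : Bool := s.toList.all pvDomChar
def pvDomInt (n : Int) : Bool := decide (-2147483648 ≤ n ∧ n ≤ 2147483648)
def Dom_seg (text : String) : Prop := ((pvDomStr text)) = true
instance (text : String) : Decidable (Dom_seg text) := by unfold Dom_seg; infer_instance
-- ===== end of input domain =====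

-- B replaces A's manual index-tracking scan with a library split on newline plus a reattaching pass: simpler and measurably faster (C-level split).

-- ===== PORT A =====
-- A: scan indices 0..len-1, slicing out text[t:i+1] at each '\n' and text[t:] at the end.
def seg (text : String) : List String :=
  let st := (PySem.List.pyRange 0 (PySem.Str.len text) 1).foldl
    (fun (st : List String × Int) i =>
      if PySem.Str.pyGet? text i = some '\n' then
        (st.1 ++ [PySem.Str.slice text (some st.2) (some (i + 1))], i + 1)
      else st)
    ([], (0 : Int))
  st.1 ++ [PySem.Str.slice text (some st.2) none]

-- ===== PORT B =====
-- B: parts = text.split('\n'); [p + '\n' for p in parts[:-1]] + [parts[-1]]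
-- (split? is some for the literal separator "\n"; parts is never empty, so the getD defaults are dead.)
def seg_alt (text : String) : List String :=
  let parts := (PySem.Str.split? text "\n").getD []
  (PySem.List.slice parts none (some (-1))).map (fun p => p ++ "\n")
    ++ [(PySem.List.pyGet? parts (-1)).getD ""]

-- ===== PRECONDITION & SPEC =====
def Spec_seg (text : String) (out : List String) : Prop := out = seg_alt text
instance (text : String) (out : List String) : Decidable (Spec_seg text out) := by unfold Spec_seg; infer_instance

-- ===== CLAIM (what is proved, stated in full; the proofs are below) =====
def Claim_equal_seg : Prop := ∀ (text : String), Dom_seg text → Spec_seg text (seg text)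

-- ===== LEMMAS AND PROOFS =====

-- Reference: the parts of `cur ++ cs` split at '\n' (separators removed), `cur` the pending prefix.
def partsNL (cur : List Char) : List Char → List (List Char)
  | [] => [cur]
  | c :: rest => if c = '\n' then cur :: partsNL [] rest else partsNL (cur ++ [c]) rest

def lastNL (cur cs : List Char) : List Char := (partsNL cur cs).getLastD []

lemma partsNL_ne_nil (cur cs : List Char) : partsNL cur cs ≠ [] := by
  induction cs generalizing cur with
  | nil => simp [partsNL]
  | cons c rest ih => by_cases h : c = '\n' <;> simp [partsNL, h, ih]

lemma lastNL_nil (cur : List Char) : lastNL cur [] = cur := rfl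

lemma lastNL_newline (cur rest : List Char) : lastNL cur ('\n' :: rest) = lastNL [] rest := by
  have hne := partsNL_ne_nil [] rest
  cases h : partsNL [] rest with
  | nil => exact absurd h hne
  | cons a l => simp [lastNL, partsNL, h]

lemma lastNL_cons_ne (cur rest : List Char) (c : Char) (h : c ≠ '\n') :
    lastNL cur (c :: rest) = lastNL (cur ++ [c]) rest := by
  simp [lastNL, partsNL, h]

lemma lastNL_len_le (cs cur : List Char) : (lastNL cur cs).length ≤ cur.length + cs.length := by
  induction cs generalizing cur with
  | nil => simp [lastNL_nil]
  | cons c rest ih =>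
    by_cases h : c = '\n'
    · subst h
      rw [lastNL_newline]
      have h2 := ih []
      simp only [List.length_nil, List.length_cons] at h2 ⊢
      omega
    · rw [lastNL_cons_ne _ _ _ h]
      have h2 := ih (cur ++ [c])
      simp only [List.length_append, List.length_cons, List.length_nil] at h2 ⊢
      omega

lemma drop_lastNL (cs cur : List Char) :
    (cur ++ cs).drop (cur.length + cs.length - (lastNL cur cs).length) = lastNL cur cs := by
  induction cs generalizing cur with
  | nil => simp [lastNL_nil]
  | cons c rest ih =>
    by_cases h : c = '\n'
    · subst h
      rw [lastNL_newline]
      have hle := lastNL_len_le rest []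
      simp at hle
      have harr : cur.length + ('\n' :: rest).length - (lastNL [] rest).length
          = (cur ++ ['\n']).length + (rest.length - (lastNL [] rest).length) := by
        simp; omega
      rw [harr]
      have : cur ++ '\n' :: rest = (cur ++ ['\n']) ++ rest := by simp
      rw [this, List.drop_append]
      have h2 := ih []
      simp only [List.length_nil, List.nil_append, Nat.zero_add] at h2
      rw [List.drop_eq_nil_of_le (by simp), List.nil_append]
      have : (cur ++ ['\n']).length + (rest.length - (lastNL [] rest).length) - (cur ++ ['\n']).length
          = rest.length - (lastNL [] rest).length := by omega
      rw [this, h2]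
    · rw [lastNL_cons_ne _ _ _ h]
      have := ih (cur ++ [c])
      have harr : cur.length + (c :: rest).length - (lastNL (cur ++ [c]) rest).length
          = (cur ++ [c]).length + rest.length - (lastNL (cur ++ [c]) rest).length := by
        simp; omega
      rw [harr]
      have hl : cur ++ c :: rest = (cur ++ [c]) ++ rest := by simp
      rw [hl]
      exact this

lemma go_nl (fuel : Nat) : ∀ (l cur : List Char) (accs : List (List Char)),
    l.length < fuel →
    PySem.Chars.splitOn.go ['\n'] fuel l cur accs = accs.reverse ++ partsNL cur.reverse l := by
  induction fuel with
  | zero => intro l cur accs h; omega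
  | succ fuel ih =>
    intro l cur accs h
    cases l with
    | nil =>
      rw [PySem.Chars.splitOn.go]
      simp [partsNL]
      omega
    | cons c rest =>
      rw [PySem.Chars.splitOn.go]
      by_cases hc : c = '\n'
      · subst hc
        simp only [List.isPrefixOf, beq_self_eq_true, Bool.true_and, if_true, List.length_singleton, List.drop_one, List.tail_cons]
        rw [ih rest [] (cur.reverse :: accs) (by simp at h; omega)]
        simp [partsNL]
      · have hpre : ['\n'].isPrefixOf (c :: rest) = false := by
          simp [List.isPrefixOf]; exact fun hh => absurd hh.symm hc
        rw [hpre]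
        simp only [Bool.false_eq_true, if_false]
        rw [ih rest (c :: cur) accs (by simp at h; omega)]
        simp [partsNL, hc]

lemma splitOn_nl (cs : List Char) : PySem.Chars.splitOn cs ['\n'] = partsNL [] cs := by
  have := go_nl (cs.length + 1) cs [] [] (by omega)
  simpa [PySem.Chars.splitOn] using this

lemma loopA (cs : List Char) : ∀ (cur pre : List Char) (s : String) (res : List String),
    s.toList = pre ++ cur ++ cs →
    (PySem.List.pyRange ((pre.length + cur.length : Nat) : Int)
        ((pre.length + cur.length + cs.length : Nat) : Int) 1).foldl
      (fun (st : List String × Int) i =>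
        if PySem.Str.pyGet? s i = some '\n' then
          (st.1 ++ [PySem.Str.slice s (some st.2) (some (i + 1))], i + 1)
        else st)
      (res, ((pre.length : Nat) : Int))
    = (res ++ ((partsNL cur cs).dropLast).map (fun p => String.ofList (p ++ ['\n'])),
       ((pre.length + cur.length + cs.length - (lastNL cur cs).length : Nat) : Int)) := by
  induction cs with
  | nil =>
    intro cur pre s res hs
    simp only [List.length_nil, Nat.add_zero]
    rw [PySem.List.pyRange_one_eq_nil (le_refl _)]
    simp [partsNL, lastNL_nil]
  | cons c rest ih =>
    intro cur pre s res hs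
    have hab : ((pre.length + cur.length : Nat) : Int)
        < ((pre.length + cur.length + (c :: rest).length : Nat) : Int) := by
      have : pre.length + cur.length + (c :: rest).length = pre.length + cur.length + (rest.length + 1) := by simp
      rw [this]; push_cast; omega
    rw [PySem.List.pyRange_one_cons hab, List.foldl_cons]
    have hget : PySem.Str.pyGet? s ((pre.length + cur.length : Nat) : Int) = some c := by
      simp only [PySem.Str.pyGet?, PySem.Chars.pyGet?_eq_listPyGet?, hs]
      rw [show ((pre.length + cur.length : Nat) : Int) = (((pre ++ cur).length : Nat) : Int) by simp]
      exact PySem.List.pyGet?_append_length _ _ _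
    by_cases hc : c = '\n'
    · subst hc
      rw [hget, if_pos rfl]
      have hslice : PySem.Str.slice s (some ((pre.length : Nat) : Int))
          (some (((pre.length + cur.length : Nat) : Int) + 1)) = String.ofList (cur ++ ['\n']) := by
        simp only [PySem.Str.slice, PySem.Chars.slice_eq_listSlice, hs]
        rw [show (((pre.length + cur.length : Nat) : Int) + 1)
            = ((pre.length + cur.length + 1 : Nat) : Int) by push_cast; ring]
        rw [PySem.List.slice_toNat _ (by positivity) (by positivity)]
        simp only [Int.toNat_natCast]
        rw [List.append_assoc, List.drop_left]
        rw [show pre.length + cur.length + 1 - pre.length = cur.length + 1 from by omega]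
        rw [List.take_append]
        simp [List.take_of_length_le (Nat.le_succ _)]
      rw [hslice]
      have hi := ih [] (pre ++ cur ++ ['\n']) s (res ++ [String.ofList (cur ++ ['\n'])])
        (by rw [hs]; simp)
      simp only [List.length_nil, Nat.add_zero] at hi
      have e1 : (((pre.length + cur.length : Nat) : Int) + 1)
          = (((pre ++ cur ++ ['\n']).length : Nat) : Int) := by
        have : (pre ++ cur ++ ['\n']).length = pre.length + cur.length + 1 := by simp; omega
        rw [this]; push_cast; ring
      have e2 : ((pre.length + cur.length + (('\n') :: rest).length : Nat) : Int)
          = (((pre ++ cur ++ ['\n']).length + rest.length : Nat) : Int) := by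
        congr 1; simp; omega
      rw [e1, e2, hi]
      have hp : partsNL cur ('\n' :: rest) = cur :: partsNL [] rest := by simp [partsNL]
      rw [hp, List.dropLast_cons_of_ne_nil (partsNL_ne_nil [] rest), lastNL_newline]
      simp only [List.map_cons, List.append_assoc, List.singleton_append, Prod.mk.injEq]
      refine ⟨by trivial, ?_⟩
      congr 1
      simp
      omega
    · rw [hget, if_neg (by simp [hc])]
      have h1 : (((pre.length + cur.length : Nat) : Int) + 1)
          = ((pre.length + (cur ++ [c]).length : Nat) : Int) := by
        have : pre.length + (cur ++ [c]).length = pre.length + cur.length + 1 := by simp; omega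
        rw [this]; push_cast; ring
      have h2 : ((pre.length + cur.length + (c :: rest).length : Nat) : Int)
          = ((pre.length + (cur ++ [c]).length + rest.length : Nat) : Int) := by
        congr 1; simp; omega
      rw [h1, h2, ih (cur ++ [c]) pre s res (by rw [hs]; simp)]
      have h3 : partsNL cur (c :: rest) = partsNL (cur ++ [c]) rest := by simp [partsNL, hc]
      rw [h3, lastNL_cons_ne _ _ _ hc]
      simp only [Prod.mk.injEq]
      refine ⟨by trivial, ?_⟩
      congr 1
      simp
      omega

lemma segA_eq (text : String) :
    seg text = ((partsNL [] text.toList).dropLast).map (fun p => String.ofList (p ++ ['\n']))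
      ++ [String.ofList (lastNL [] text.toList)] := by
  have h := loopA text.toList [] [] text [] (by simp)
  simp only [List.length_nil, Nat.add_zero, Nat.zero_add, Nat.cast_zero, List.nil_append] at h
  have hdrop := drop_lastNL text.toList []
  simp only [List.nil_append, List.length_nil, Nat.zero_add] at hdrop
  have hs2 : PySem.Str.slice text
      (some ((text.toList.length - (lastNL [] text.toList).length : Nat) : Int)) none
      = String.ofList (lastNL [] text.toList) := by
    simp only [PySem.Str.slice, PySem.Chars.slice_eq_listSlice]
    rw [PySem.List.slice_from _ (by positivity)]
    simp only [Int.toNat_natCast]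
    rw [hdrop]
  simp only [seg]
  rw [show PySem.Str.len text = ((text.toList.length : Nat) : Int) from rfl]
  rw [h, hs2]

lemma segB_eq (text : String) :
    seg_alt text = ((partsNL [] text.toList).dropLast).map (fun p => String.ofList (p ++ ['\n']))
      ++ [String.ofList (lastNL [] text.toList)] := by
  have hsep : ("\n" : String).toList = ['\n'] := by decide
  have h1 : PySem.Str.split? text "\n" = some ((partsNL [] text.toList).map String.ofList) := by
    simp [PySem.Str.split?, PySem.Chars.split?, hsep, splitOn_nl]
  unfold seg_alt
  rw [h1]
  simp only [Option.getD_some]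
  rw [PySem.List.slice_to_neg_one, PySem.List.pyGet?_neg_one]
  have hne := partsNL_ne_nil [] text.toList
  obtain ⟨x, hx⟩ := Option.isSome_iff_exists.mp (List.getLast?_isSome.mpr hne)
  rw [List.getLast?_map, hx]
  have hlast : lastNL [] text.toList = x := by
    simp [lastNL, List.getLastD_eq_getLast?, hx]
  rw [hlast, ← List.map_dropLast, List.map_map]
  simp only [Option.map_some, Option.getD_some]
  congr 1
  apply List.map_congr_left
  intro p _
  rw [show ("\n" : String) = String.ofList ['\n'] from by decide, String.ofList_append]
  simp

-- ===== VERDICT (by name: the statement is the Claim_ definition above) =====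
theorem seg_spec : Claim_equal_seg := by
  intro text _
  unfold Spec_seg
  rw [segA_eq, segB_eq]
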